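-- pv_equiv track=rewrite | github.com/yerson001/BioApp | Local.py | formar_diagonales
-- ===== SOURCE A (Python) =====
-- def formar_diagonales(matriz, n, m):
--     diagonales = []
--     for i in range(1, n):
--         for j in range(1, m):
--             temp_indice = []
--             temp_diagonal = []
--             if matriz[i][j] != 0:
--                 temp_indice.append(i)
--                 temp_indice.append(j)
--                 temp_diagonal.append(matriz[i][j])
--                 tempi = i + 1
--                 tempj = j + 1
--                 temp_indice = []
--
--                 while (tempi < n and tempj < m and matriz[tempi][tempj] != 0):
--                     temp_indice.append(tempi)
--                     temp_indice.append(tempj)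
--                     temp_diagonal.append(matriz[tempi][tempj])
--                     temp_indice = []
--                     tempi = tempi + 1
--                     tempj = tempj + 1
--                 diagonales.append(temp_diagonal)
--             if matriz[i][j] == 0:
--                 continue
--     return diagonales
-- ===== SOURCE B (Python) =====
-- def formar_diagonales(matriz, n, m):
--     # Bottom-up DP over rows: next_runs[j] holds the diagonal run starting at
--     # (i+1, j) (missing entries mean []), so each run is built from the
--     # already-computed suffix instead of rescanning its whole diagonal.
--     next_runs = []
--     all_rows = []
--     for i in reversed(range(1, n)):
--         cur = [([matriz[i][j]] + (next_runs[j + 1] if j + 1 < len(next_runs) else []))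
--                if matriz[i][j] != 0 else []
--                for j in range(1, m)]
--         all_rows.append(cur)
--         next_runs = [[]] + cur
--     all_rows.reverse()
--     return [run for row in all_rows for run in row if run]
-- ===== Notes on version B (the rewrite author's own statement) =====
-- stated objective: alternative
-- what changed: Replaces A's per-cell rescan of each down-right diagonal (a while loop restarted at every nonzero cell) with a single bottom-up dynamic-programming pass over rows that builds each run from the next row's already-computed suffix runs, then emits rows in A's order.
import Mathlib
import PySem

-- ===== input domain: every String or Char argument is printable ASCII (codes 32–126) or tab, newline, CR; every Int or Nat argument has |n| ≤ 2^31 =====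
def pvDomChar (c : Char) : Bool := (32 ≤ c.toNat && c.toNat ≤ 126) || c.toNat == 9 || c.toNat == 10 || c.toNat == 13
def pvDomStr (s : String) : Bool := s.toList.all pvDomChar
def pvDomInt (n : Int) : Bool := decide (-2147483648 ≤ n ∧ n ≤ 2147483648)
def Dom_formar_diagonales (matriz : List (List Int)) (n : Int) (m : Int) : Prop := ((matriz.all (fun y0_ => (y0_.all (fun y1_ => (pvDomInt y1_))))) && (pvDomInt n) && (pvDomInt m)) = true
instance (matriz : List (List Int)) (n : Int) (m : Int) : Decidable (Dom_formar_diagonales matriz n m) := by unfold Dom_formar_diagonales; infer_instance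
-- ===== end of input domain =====

-- B replaces A's per-cell rescan of each diagonal with one bottom-up DP pass over rows
-- (alternative decomposition; return value only, neither mutates its arguments).

-- ===== PORT A =====
-- matriz[i][j]; total with default 0, exact on indices Pre_ guarantees in range
def pvGet2 (matriz : List (List Int)) (i j : Int) : Int :=
  (PySem.List.pyGet? ((PySem.List.pyGet? matriz i).getD []) j).getD 0

-- the 'while (tempi < n and tempj < m and matriz[tempi][tempj] != 0)' loop of A
def pvAWhile (matriz : List (List Int)) (n m tempi tempj : Int) (acc : List Int) : List Int :=
  if _h : tempi < n ∧ tempj < m ∧ pvGet2 matriz tempi tempj ≠ 0 then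
    pvAWhile matriz n m (tempi + 1) (tempj + 1) (acc ++ [pvGet2 matriz tempi tempj])
  else acc
termination_by (n - tempi).toNat
decreasing_by omega

def formar_diagonales (matriz : List (List Int)) (n : Int) (m : Int) : List (List Int) :=
  (PySem.List.pyRange 1 n 1).foldl (fun diagonales i =>
    (PySem.List.pyRange 1 m 1).foldl (fun diagonales j =>
      if pvGet2 matriz i j ≠ 0 then
        diagonales ++ [pvAWhile matriz n m (i + 1) (j + 1) [pvGet2 matriz i j]]
      else diagonales) diagonales) []

-- ===== PORT B =====
-- the row comprehension of Source B: runs for row i, given next_runs for row i+1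
def pvRowB (matriz : List (List Int)) (m i : Int) (nextRuns : List (List Int)) : List (List Int) :=
  (PySem.List.pyRange 1 m 1).map (fun j =>
    if pvGet2 matriz i j ≠ 0 then
      pvGet2 matriz i j ::
        (if j + 1 < (nextRuns.length : Int) then (PySem.List.pyGet? nextRuns (j + 1)).getD [] else [])
    else [])

def formar_diagonales_alt (matriz : List (List Int)) (n : Int) (m : Int) : List (List Int) :=
  let st := ((PySem.List.pyRange 1 n 1).reverse).foldl
      (fun (st : List (List (List Int)) × List (List Int)) i =>
        let cur := pvRowB matriz m i st.2
        (st.1 ++ [cur], [] :: cur)) ([], [])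
  st.1.reverse.flatMap (fun row => row.filter (fun run => !run.isEmpty))

-- ===== PRECONDITION & SPEC =====
-- Pre_ excludes exactly the inputs where A raises IndexError: whenever both loop
-- ranges are nonempty, rows 1..n-1 must exist and each of them must have length ≥ m.
def Pre_formar_diagonales (matriz : List (List Int)) (n : Int) (m : Int) : Prop :=
  1 < n → 1 < m → n ≤ (matriz.length : Int) ∧
    ∀ row ∈ (matriz.take n.toNat).drop 1, m ≤ (row.length : Int)
instance (matriz : List (List Int)) (n : Int) (m : Int) : Decidable (Pre_formar_diagonales matriz n m) := by unfold Pre_formar_diagonales; infer_instance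

def pvWitness_formar_diagonales : List (List Int) × Int × Int := ([[0, 0], [0, 1]], 2, 2)

def Spec_formar_diagonales (matriz : List (List Int)) (n : Int) (m : Int) (out : List (List Int)) : Prop := out = formar_diagonales_alt matriz n m
instance (matriz : List (List Int)) (n : Int) (m : Int) (out : List (List Int)) : Decidable (Spec_formar_diagonales matriz n m out) := by unfold Spec_formar_diagonales; infer_instance

-- ===== CLAIM (what is proved, stated in full; the proofs are below) =====
def Claim_equal_formar_diagonales : Prop := ∀ (matriz : List (List Int)) (n : Int) (m : Int), Dom_formar_diagonales matriz n m → Pre_formar_diagonales matriz n m → Spec_formar_diagonales matriz n m (formar_diagonales matriz n m)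

-- ===== LEMMAS AND PROOFS =====

-- the run A emits at a nonzero cell (i, j)
def pvRun (matriz : List (List Int)) (n m i j : Int) : List Int :=
  pvGet2 matriz i j :: pvAWhile matriz n m (i + 1) (j + 1) []

-- runs of row i (entry [] at zero cells), the value B's fold computes per row
def pvRowRuns (matriz : List (List Int)) (n m i : Int) : List (List Int) :=
  (PySem.List.pyRange 1 m 1).map (fun j =>
    if pvGet2 matriz i j ≠ 0 then pvRun matriz n m i j else [])

theorem pvAWhile_acc (matriz : List (List Int)) (n m : Int) :
    ∀ (k : Nat) (tempi tempj : Int), (n - tempi).toNat = k → ∀ (acc : List Int),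
      pvAWhile matriz n m tempi tempj acc = acc ++ pvAWhile matriz n m tempi tempj [] := by
  intro k
  induction k with
  | zero =>
    intro tempi tempj hk acc
    have h : ¬(tempi < n ∧ tempj < m ∧ pvGet2 matriz tempi tempj ≠ 0) :=
      fun hh => absurd hh.1 (by omega)
    conv_lhs => rw [pvAWhile]
    conv_rhs => rw [pvAWhile]
    rw [dif_neg h, dif_neg h]
    simp
  | succ k ih =>
    intro tempi tempj hk acc
    by_cases h : tempi < n ∧ tempj < m ∧ pvGet2 matriz tempi tempj ≠ 0
    · conv_lhs => rw [pvAWhile]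
      conv_rhs => rw [pvAWhile]
      rw [dif_pos h, dif_pos h]
      rw [ih (tempi + 1) (tempj + 1) (by omega) (acc ++ [pvGet2 matriz tempi tempj]),
          ih (tempi + 1) (tempj + 1) (by omega) ([] ++ [pvGet2 matriz tempi tempj])]
      simp
    · conv_lhs => rw [pvAWhile]
      conv_rhs => rw [pvAWhile]
      rw [dif_neg h, dif_neg h]
      simp

theorem pvAWhile_eq_run (matriz : List (List Int)) (n m i j : Int) :
    pvAWhile matriz n m i j [] =
      if i < n ∧ j < m ∧ pvGet2 matriz i j ≠ 0 then pvRun matriz n m i j else [] := by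
  by_cases h : i < n ∧ j < m ∧ pvGet2 matriz i j ≠ 0
  · conv_lhs => rw [pvAWhile]
    rw [dif_pos h, if_pos h,
        pvAWhile_acc matriz n m (n - (i + 1)).toNat (i + 1) (j + 1) rfl, pvRun]
    simp
  · conv_lhs => rw [pvAWhile]
    rw [dif_neg h, if_neg h]

-- the run recurrence: each run is its head followed by the next cell's run (or [])
theorem pvRun_rec (matriz : List (List Int)) (n m i j : Int) :
    pvRun matriz n m i j =
      pvGet2 matriz i j ::
        (if i + 1 < n ∧ j + 1 < m ∧ pvGet2 matriz (i + 1) (j + 1) ≠ 0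
         then pvRun matriz n m (i + 1) (j + 1) else []) := by
  rw [pvRun, pvAWhile_eq_run]

-- next_runs as B maintains it for row i: [] :: runs of row i, or the initial all-[] list
def pvNextAt (matriz : List (List Int)) (n m i : Int) : List (List Int) :=
  if i < n then [] :: pvRowRuns matriz n m i else []

theorem pvNextAt_length (matriz : List (List Int)) (n m i : Int) (hn : i < n) :
    ((pvNextAt matriz n m i).length : Int) = 1 + ((m - 1).toNat : Int) := by
  rw [pvNextAt, if_pos hn, pvRowRuns]
  simp [PySem.List.length_pyRange_one]
  omega

theorem pvNextAt_lookup (matriz : List (List Int)) (n m i j : Int)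
    (h1 : 1 ≤ j) (h2 : j + 1 < m) (hn : i + 1 < n) :
    (PySem.List.pyGet? (pvNextAt matriz n m (i + 1)) (j + 1)).getD [] =
      (if pvGet2 matriz (i + 1) (j + 1) ≠ 0
       then pvRun matriz n m (i + 1) (j + 1) else []) := by
  rw [pvNextAt, if_pos hn]
  rw [PySem.List.pyGet?_of_nonneg _ (by omega),
      show (j + 1).toNat = j.toNat + 1 from by omega, List.getElem?_cons_succ, pvRowRuns]
  have hlen : j.toNat < ((PySem.List.pyRange 1 m 1).map (fun j =>
      if pvGet2 matriz (i + 1) j ≠ 0 then pvRun matriz n m (i + 1) j else [])).length := by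
    simp [PySem.List.length_pyRange_one]
    omega
  rw [List.getElem?_eq_getElem hlen]
  simp only [List.getElem_map, PySem.List.getElem_pyRange_one, Option.getD_some]
  rw [show (1 : Int) + j.toNat = j + 1 from by omega]

-- B's row computation from next_runs of row i+1 equals the runs of row i
theorem pvRowB_eq (matriz : List (List Int)) (n m i : Int) :
    pvRowB matriz m i (pvNextAt matriz n m (i + 1)) = pvRowRuns matriz n m i := by
  rw [pvRowB, pvRowRuns]
  apply List.map_congr_left
  intro j hj
  rw [PySem.List.mem_pyRange_one] at hj
  by_cases hc : pvGet2 matriz i j ≠ 0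
  · rw [if_pos hc, if_pos hc, pvRun_rec]
    congr 1
    by_cases hn : i + 1 < n
    · rw [pvNextAt_length matriz n m (i + 1) hn]
      by_cases hjm : j + 1 < m
      · rw [if_pos (by omega), pvNextAt_lookup matriz n m i j hj.1 hjm hn]
        by_cases h' : pvGet2 matriz (i + 1) (j + 1) ≠ 0
        · rw [if_pos h', if_pos ⟨hn, hjm, h'⟩]
        · rw [if_neg h', if_neg (by tauto)]
      · rw [if_neg (by omega), if_neg (by tauto)]
    · rw [pvNextAt, if_neg hn]
      simp only [List.length_nil, Int.natCast_zero]
      rw [if_neg (by omega), if_neg (by tauto)]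
  · rw [if_neg hc, if_neg hc]

-- the fold invariant of B, by backward induction over the row range
theorem pvFold_inv (matriz : List (List Int)) (n m : Int) :
    ∀ (k : Nat) (i0 : Int), (n - i0).toNat = k →
      (PySem.List.pyRange i0 n 1).foldr
        (fun i (st : List (List (List Int)) × List (List Int)) =>
          (st.1 ++ [pvRowB matriz m i st.2], [] :: pvRowB matriz m i st.2))
        ([], []) =
      (((PySem.List.pyRange i0 n 1).map (pvRowRuns matriz n m)).reverse,
        pvNextAt matriz n m i0) := by
  intro k
  induction k with
  | zero =>
    intro i0 hk
    have h : n ≤ i0 := by omega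
    rw [PySem.List.pyRange_one_eq_nil h]
    simp [pvNextAt, not_lt.mpr h]
  | succ k ih =>
    intro i0 hk
    have h : i0 < n := by omega
    rw [PySem.List.pyRange_one_cons h]
    simp only [List.foldr_cons, List.map_cons, List.reverse_cons]
    rw [ih (i0 + 1) (by omega)]
    simp only []
    rw [pvRowB_eq]
    rw [pvNextAt, if_pos h]

-- generic: rewrite a foldl step pointwise
theorem pvFoldlCongr {α β : Type} (f g : β → α → β) (l : List α) (b : β)
    (h : ∀ b x, f b x = g b x) : l.foldl f b = l.foldl g b := by
  induction l generalizing b with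
  | nil => rfl
  | cons x xs ih => simp only [List.foldl_cons, h, ih]

-- generic: append-if fold = filter-then-map (Prop condition)
theorem pvFoldAppendIf {α β : Type} (c : α → Prop) [DecidablePred c] (f : α → β) :
    ∀ (l : List α) (acc : List β),
      l.foldl (fun acc x => if c x then acc ++ [f x] else acc) acc =
        acc ++ (l.filter (fun x => decide (c x))).map f := by
  intro l
  induction l with
  | nil => simp
  | cons x xs ih =>
    intro acc
    by_cases hx : c x <;> simp [List.foldl_cons, hx, ih]

-- filtering the nonempty entries of a row of runs keeps exactly the nonzero cells' runs
theorem pvRowRuns_filter (matriz : List (List Int)) (n m i : Int) :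
    (pvRowRuns matriz n m i).filter (fun run => !run.isEmpty) =
      ((PySem.List.pyRange 1 m 1).filter
        (fun j => decide (pvGet2 matriz i j ≠ 0))).map (pvRun matriz n m i) := by
  rw [pvRowRuns]
  induction (PySem.List.pyRange 1 m 1) with
  | nil => simp
  | cons j js ih =>
    simp only [List.map_cons, List.filter_cons]
    by_cases hc : pvGet2 matriz i j ≠ 0
    · rw [if_pos hc, pvRun]
      simp only [List.isEmpty_cons, Bool.not_false, if_pos]
      rw [ih]
      simp [hc, pvRun]
    · rw [if_neg hc]
      simp only [List.isEmpty_nil, Bool.not_true]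
      rw [ih]
      simp [hc]

-- A expressed as a flatMap of filtered-and-mapped rows
theorem pvA_flat (matriz : List (List Int)) (n m : Int) :
    formar_diagonales matriz n m =
      (PySem.List.pyRange 1 n 1).flatMap (fun i =>
        ((PySem.List.pyRange 1 m 1).filter
          (fun j => decide (pvGet2 matriz i j ≠ 0))).map (pvRun matriz n m i)) := by
  rw [formar_diagonales]
  have hinner : ∀ (i : Int) (acc : List (List Int)),
      (PySem.List.pyRange 1 m 1).foldl (fun diagonales j =>
        if pvGet2 matriz i j ≠ 0 then
          diagonales ++ [pvAWhile matriz n m (i + 1) (j + 1) [pvGet2 matriz i j]]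
        else diagonales) acc =
      acc ++ ((PySem.List.pyRange 1 m 1).filter
        (fun j => decide (pvGet2 matriz i j ≠ 0))).map (pvRun matriz n m i) := by
    intro i acc
    rw [pvFoldAppendIf (fun j => pvGet2 matriz i j ≠ 0)
      (fun j => pvAWhile matriz n m (i + 1) (j + 1) [pvGet2 matriz i j])]
    congr 1
    apply List.map_congr_left
    intro j _
    rw [pvAWhile_acc matriz n m (n - (i + 1)).toNat (i + 1) (j + 1) rfl, pvRun]
    simp
  calc (PySem.List.pyRange 1 n 1).foldl (fun diagonales i =>
        (PySem.List.pyRange 1 m 1).foldl (fun diagonales j =>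
          if pvGet2 matriz i j ≠ 0 then
            diagonales ++ [pvAWhile matriz n m (i + 1) (j + 1) [pvGet2 matriz i j]]
          else diagonales) diagonales) []
      = (PySem.List.pyRange 1 n 1).foldl (fun diagonales i =>
          diagonales ++ ((PySem.List.pyRange 1 m 1).filter
            (fun j => decide (pvGet2 matriz i j ≠ 0))).map (pvRun matriz n m i)) [] := by
        exact pvFoldlCongr _ _ _ _ (fun acc i => hinner i acc)
    _ = _ := by
        rw [PySem.List.foldl_append_eq_flatMap]
        simp

-- ===== VERDICT (by name: the statement is the Claim_ definition above) =====
theorem formar_diagonales_spec : Claim_equal_formar_diagonales := by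
  intro matriz n m _ _
  unfold Spec_formar_diagonales
  rw [pvA_flat]
  show _ = formar_diagonales_alt matriz n m
  rw [formar_diagonales_alt]
  simp only [List.foldl_reverse]
  rw [pvFold_inv matriz n m (n - 1).toNat 1 rfl]
  simp only [List.reverse_reverse, List.flatMap_map]
  congr 1
  funext i
  exact (pvRowRuns_filter matriz n m i).symm
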